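-- pv_equiv track=rewrite | github.com/ecampo12/2023_advent_of_code | Python/day14/AOC.py | tilt_cyclic
-- ===== SOURCE A (Python) =====
-- def tilt_cyclic(grid):
--     for _ in range(4):
--         transposed = tuple(map("".join, zip(*grid)))
--         new_grid = []
--         for row in transposed:
--             sorted_row = []
--             for group in row.split('#'):
--                 sorted_row.append("".join(sorted(tuple(group), reverse=True)))
--
--             final_row_string = "#".join(sorted_row)
--             new_grid.append(final_row_string)
--
--         new_grid = tuple(new_grid)
--         grid = tuple(row[::-1] for row in new_grid)
--     return grid
-- ===== SOURCE B (Python) =====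
-- def tilt_cyclic(grid):
--     for _ in range(4):
--         new_grid = []
--         for row in map("".join, zip(*grid)):
--             counts = [0] * 128
--             mn, mx = 127, -1
--             out = []
--             for ch in row:
--                 if ch == '#':
--                     out.append(_flush(counts, mn, mx))
--                     counts = [0] * 128
--                     mn, mx = 127, -1
--                     out.append('#')
--                 else:
--                     code = ord(ch)
--                     counts[code] += 1
--                     if code < mn:
--                         mn = code
--                     if code > mx:
--                         mx = code
--             out.append(_flush(counts, mn, mx))
--             new_grid.append("".join(out)[::-1])
--         grid = tuple(new_grid)
--     return grid
--
--
-- def _flush(counts, mn, mx):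
--     # emit the counted characters in descending character order (counting sort
--     # over the occupied code range; empty range for an empty group)
--     return "".join(chr(code) * counts[code] for code in range(mx, mn - 1, -1))
-- ===== Notes on version B (the rewrite author's own statement) =====
-- stated objective: alternative
-- what changed: Each transposed row is tilted by a single left-to-right pass that counts characters (plus the min/max code seen) and emits them in descending character order at every '#' and at the row end (a counting sort over the occupied code range), instead of A's split('#') / sorted(group, reverse=True) / '#'.join per row.
import Mathlib
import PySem

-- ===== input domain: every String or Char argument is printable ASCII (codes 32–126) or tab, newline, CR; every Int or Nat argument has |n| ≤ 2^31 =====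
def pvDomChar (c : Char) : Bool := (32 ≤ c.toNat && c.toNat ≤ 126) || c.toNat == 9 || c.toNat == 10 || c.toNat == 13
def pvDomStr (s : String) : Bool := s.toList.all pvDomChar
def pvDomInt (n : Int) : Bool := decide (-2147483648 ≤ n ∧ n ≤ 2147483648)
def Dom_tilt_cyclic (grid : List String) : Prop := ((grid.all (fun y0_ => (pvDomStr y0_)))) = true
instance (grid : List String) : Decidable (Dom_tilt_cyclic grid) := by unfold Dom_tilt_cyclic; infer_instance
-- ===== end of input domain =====

-- B replaces A's per-group sorted(..., reverse=True) after split('#') by a single left-to-right pass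
-- over each row with a counting sort (no comparison sort, no split). Same return value everywhere on Dom.

-- ===== PORT A =====
-- zip(*grid) followed by "".join per column: columns as long as the shortest row
def pvTranspose : List (List Char) → List (List Char)
  | [] => []
  | r :: rs =>
    if h : ((r :: rs).any (fun l => l.isEmpty)) then []
    else ((r :: rs).map (fun l => l.headD ' ')) :: pvTranspose ((r :: rs).map (fun l => l.tail))
termination_by rows => (rows.headD []).length
decreasing_by
  simp only [List.any_cons, Bool.or_eq_true, not_or] at h
  simp only [List.map_cons, List.headD_cons, List.length_tail]
  have hr : r ≠ [] := by simpa [List.isEmpty_iff] using h.1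
  have := List.length_pos_of_ne_nil hr
  omega

-- the inner loop of A: split on '#', sort each group descending, re-join with '#'
def pvRowA (row : List Char) : List Char :=
  let sorted_row := (PySem.Chars.splitOn row ['#']).map (fun group => PySem.List.sorted group (fun x => x) true)
  PySem.Chars.join ['#'] sorted_row

-- one iteration of A's outer loop: transpose, sort each row, then reverse each row
def pvStepA (g : List (List Char)) : List (List Char) :=
  let transposed := pvTranspose g
  let new_grid := transposed.map pvRowA
  new_grid.map List.reverse

def tilt_cyclic (grid : List String) : List String :=
  ((PySem.List.pyRange 0 4 1).foldl (fun g _ => pvStepA g) (grid.map String.toList)).map String.ofList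

-- ===== PORT B =====
-- _flush: emit the counted characters in descending character order (counting sort over the
-- occupied code range [mn, mx]; empty range for an empty group)
def pvFlush (counts : List Nat) (mn mx : Int) : List Char :=
  (PySem.List.pyRange mx (mn - 1) (-1)).foldl
    (fun o code => o ++ List.replicate (counts.getD code.toNat 0) (Char.ofNat code.toNat)) []

-- counts[ord(ch)] += 1  (on the stated domain ord(ch) < 128, so the list write is exact)
def pvBump (counts : List Nat) (c : Char) : List Nat := counts.set c.toNat (counts.getD c.toNat 0 + 1)

-- the body of B's character loop; state = (counts, mn, mx, out)
def pvStepRow (st : List Nat × Int × Int × List Char) (ch : Char) : List Nat × Int × Int × List Char :=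
  if ch = '#' then (List.replicate 128 0, 127, -1, st.2.2.2 ++ pvFlush st.1 st.2.1 st.2.2.1 ++ ['#'])
  else (pvBump st.1 ch, min st.2.1 (ch.toNat : Int), max st.2.2.1 (ch.toNat : Int), st.2.2.2)

-- the inner loop of B: one pass over the row, counting characters, flushing at each '#' and at the end
def pvRowB (row : List Char) : List Char :=
  let st := row.foldl pvStepRow (List.replicate 128 0, 127, -1, [])
  st.2.2.2 ++ pvFlush st.1 st.2.1 st.2.2.1

-- one iteration of B's outer loop: transpose, counting-sort each row and reverse it
def pvStepB (g : List (List Char)) : List (List Char) :=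
  (pvTranspose g).map (fun row => (pvRowB row).reverse)

def tilt_cyclic_alt (grid : List String) : List String :=
  ((PySem.List.pyRange 0 4 1).foldl (fun g _ => pvStepB g) (grid.map String.toList)).map String.ofList

-- ===== PRECONDITION & SPEC =====
def Spec_tilt_cyclic (grid : List String) (out : List String) : Prop := out = tilt_cyclic_alt grid
instance (grid : List String) (out : List String) : Decidable (Spec_tilt_cyclic grid out) := by unfold Spec_tilt_cyclic; infer_instance

-- ===== CLAIM (what is proved, stated in full; the proofs are below) =====
def Claim_equal_tilt_cyclic : Prop := ∀ (grid : List String), Dom_tilt_cyclic grid → Spec_tilt_cyclic grid (tilt_cyclic grid)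

-- ===== LEMMAS AND PROOFS =====

-- simple structural description of row.split('#')
def pvSplit (pre : List Char) : List Char → List (List Char)
  | [] => [pre]
  | c :: rest => if c = '#' then pre :: pvSplit [] rest else pvSplit (pre ++ [c]) rest

-- character counts, minimum code and maximum code of a group
def pvCounts (g : List Char) : List Nat := g.foldl pvBump (List.replicate 128 0)
def pvMn (g : List Char) : Int := g.foldl (fun m c => min m (c.toNat : Int)) 127
def pvMx (g : List Char) : Int := g.foldl (fun m c => max m (c.toNat : Int)) (-1)
-- what B emits for one '#'-free group
def pvEmit (g : List Char) : List Char := pvFlush (pvCounts g) (pvMn g) (pvMx g)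

-- every character of every row has code ≤ 126
def pvOk (g : List (List Char)) : Prop := ∀ r ∈ g, ∀ c ∈ r, c.toNat ≤ 126

lemma pvSplit_ne_nil (r : List Char) (pre : List Char) : pvSplit pre r ≠ [] := by
  induction r generalizing pre with
  | nil => simp [pvSplit]
  | cons c rest ih =>
    by_cases h : c = '#' <;> simp [pvSplit, h]
    exact ih (pre ++ [c])

lemma pv_join_cons (a : List Char) (l : List (List Char)) (h : l ≠ []) :
    PySem.Chars.join ['#'] (a :: l) = a ++ '#' :: PySem.Chars.join ['#'] l := by
  cases l with
  | nil => simp at h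
  | cons b t => simp [PySem.Chars.join, List.intercalate]

lemma pv_go_eq (fuel : Nat) : ∀ (l cur : List Char) (acc : List (List Char)), l.length < fuel →
    PySem.Chars.splitOn.go ['#'] fuel l cur acc = acc.reverse ++ pvSplit cur.reverse l := by
  induction fuel with
  | zero => intro l cur acc h; omega
  | succ fuel ih =>
    intro l cur acc h
    cases l with
    | nil => simp [PySem.Chars.splitOn.go, pvSplit]
    | cons c rest =>
      by_cases hc : c = '#'
      · subst hc
        rw [PySem.Chars.splitOn.go]
        simp only [List.isPrefixOf, BEq.rfl, Bool.true_and, if_true, List.length_cons,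
          List.length_nil, List.drop_succ_cons, List.drop_zero]
        rw [ih rest [] (cur.reverse :: acc) (by simp at h ⊢; omega)]
        simp [pvSplit]
      · rw [PySem.Chars.splitOn.go]
        have hp : (['#'].isPrefixOf (c :: rest)) = false := by
          simp [List.isPrefixOf]
          exact fun hh => hc hh.symm
        simp only [hp, Bool.false_eq_true, if_false]
        rw [ih rest (c :: cur) acc (by simp at h ⊢; omega)]
        simp [pvSplit, hc]

lemma pv_splitOn_eq (r : List Char) : PySem.Chars.splitOn r ['#'] = pvSplit [] r := by
  have := pv_go_eq (r.length + 1) r [] [] (by omega)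
  simpa [PySem.Chars.splitOn] using this

lemma pv_toNat_ofNat (n : Nat) (h : n ≤ 126) : (Char.ofNat n).toNat = n := by
  rw [Char.toNat_ofNat]
  simp [Nat.isValidChar, show n < 55296 by omega]

lemma pv_toNat_inj : Function.Injective Char.toNat := fun a b h => Char.ext (by
  exact UInt32.toNat_inj.mp h)

lemma pv_counts_foldl (g : List Char) : ∀ (cs : List Nat), (∀ c ∈ g, c.toNat < cs.length) →
    ∀ k, (g.foldl pvBump cs).getD k 0 = cs.getD k 0 + g.countP (fun c => c.toNat == k) := by
  induction g with
  | nil => simp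
  | cons c g ih =>
    intro cs h k
    rw [List.foldl_cons, ih (pvBump cs c)
      (by intro x hx; simpa [pvBump] using h x (List.mem_cons_of_mem _ hx))]
    have hc : c.toNat < cs.length := h c List.mem_cons_self
    have : (pvBump cs c).getD k 0 = cs.getD k 0 + (if c.toNat = k then 1 else 0) := by
      simp only [pvBump, List.getD_eq_getElem?_getD, List.getElem?_set]
      split_ifs with h1
      · subst h1; simp [hc]
      · simp
    rw [this, List.countP_cons]
    simp only [beq_iff_eq]
    split_ifs <;> omega

lemma pv_counts_getD (g : List Char) (h : ∀ c ∈ g, c.toNat ≤ 126) (k : Nat) :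
    (pvCounts g).getD k 0 = g.countP (fun c => c.toNat == k) := by
  rw [pvCounts, pv_counts_foldl g _ (by intro c hc; have := h c hc; simp; omega) k]
  simp only [List.getD_eq_getElem?_getD, List.getElem?_replicate]
  split_ifs <;> simp

lemma pv_flush_eq_flatMap (cs : List Nat) (mn mx : Int) :
    pvFlush cs mn mx = (PySem.List.pyRange mx (mn - 1) (-1)).flatMap
      (fun code => List.replicate (cs.getD code.toNat 0) (Char.ofNat code.toNat)) := by
  rw [pvFlush, PySem.List.foldl_append_eq_flatMap]
  simp

lemma pv_foldMin_le_init (g : List Char) : ∀ (m : Int),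
    g.foldl (fun m c => min m (c.toNat : Int)) m ≤ m := by
  induction g with
  | nil => intro m; simp
  | cons x g ih =>
    intro m
    rw [List.foldl_cons]
    exact le_trans (ih _) (min_le_left _ _)

lemma pv_foldMax_ge_init (g : List Char) : ∀ (m : Int),
    m ≤ g.foldl (fun m c => max m (c.toNat : Int)) m := by
  induction g with
  | nil => intro m; simp
  | cons x g ih =>
    intro m
    rw [List.foldl_cons]
    exact le_trans (le_max_left _ _) (ih _)

lemma pv_foldMin_le (g : List Char) : ∀ (m : Int) (c : Char), c ∈ g →
    g.foldl (fun m c => min m (c.toNat : Int)) m ≤ (c.toNat : Int) := by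
  induction g with
  | nil => intro m c hc; simp at hc
  | cons x g ih =>
    intro m c hc
    rw [List.foldl_cons]
    rcases List.mem_cons.mp hc with h1 | h1
    · subst h1
      calc g.foldl (fun m c => min m (c.toNat : Int)) (min m (c.toNat : Int))
            ≤ min m (c.toNat : Int) := pv_foldMin_le_init g _
        _ ≤ (c.toNat : Int) := min_le_right _ _
    · exact ih _ c h1

lemma pv_foldMax_ge (g : List Char) : ∀ (m : Int) (c : Char), c ∈ g →
    (c.toNat : Int) ≤ g.foldl (fun m c => max m (c.toNat : Int)) m := by
  induction g with
  | nil => intro m c hc; simp at hc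
  | cons x g ih =>
    intro m c hc
    rw [List.foldl_cons]
    rcases List.mem_cons.mp hc with h1 | h1
    · subst h1
      calc (c.toNat : Int) ≤ max m (c.toNat : Int) := le_max_right _ _
        _ ≤ g.foldl (fun m c => max m (c.toNat : Int)) (max m (c.toNat : Int)) :=
            pv_foldMax_ge_init g _
    · exact ih _ c h1

lemma pv_foldMin_nonneg (g : List Char) : ∀ (m : Int), 0 ≤ m →
    0 ≤ g.foldl (fun m c => min m (c.toNat : Int)) m := by
  induction g with
  | nil => intro m hm; simpa using hm
  | cons x g ih =>
    intro m hm
    rw [List.foldl_cons]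
    exact ih _ (by positivity)

lemma pv_foldMax_le (g : List Char) (hg : ∀ c ∈ g, c.toNat ≤ 126) : ∀ (m : Int), m ≤ 126 →
    g.foldl (fun m c => max m (c.toNat : Int)) m ≤ 126 := by
  induction g with
  | nil => intro m hm; simpa using hm
  | cons x g ih =>
    intro m hm
    rw [List.foldl_cons]
    refine ih (fun c hc => hg c (List.mem_cons_of_mem _ hc)) _ ?_
    have := hg x List.mem_cons_self
    simp only [max_le_iff]
    omega

lemma pv_mn_nonneg (g : List Char) : 0 ≤ pvMn g := pv_foldMin_nonneg g 127 (by omega)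

lemma pv_mx_le (g : List Char) (hg : ∀ c ∈ g, c.toNat ≤ 126) : pvMx g ≤ 126 :=
  pv_foldMax_le g hg (-1) (by omega)

lemma pv_emit_range_bounds (g : List Char) (hg : ∀ c ∈ g, c.toNat ≤ 126) :
    ∀ x ∈ PySem.List.pyRange (pvMx g) (pvMn g - 1) (-1), 0 ≤ x ∧ x ≤ 126 := by
  intro x hx
  have hb := PySem.List.mem_pyRange_neg_one.mp hx
  have h1 := pv_mn_nonneg g
  have h2 := pv_mx_le g hg
  omega

lemma pv_mem_emit (g : List Char) (hg : ∀ c ∈ g, c.toNat ≤ 126) (c : Char)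
    (h : c ∈ pvEmit g) : c.toNat ≤ 126 := by
  rw [pvEmit, pv_flush_eq_flatMap] at h
  obtain ⟨x, hx, hc⟩ := List.mem_flatMap.mp h
  have hb := pv_emit_range_bounds g hg x hx
  have := List.eq_of_mem_replicate hc
  subst this
  rw [pv_toNat_ofNat _ (by omega)]
  omega

lemma pv_count_flat (cs : List Nat) (c : Char) (hc : c.toNat ≤ 126) :
    ∀ (L : List Int), (∀ x ∈ L, 0 ≤ x ∧ x ≤ 126) → L.Nodup →
    List.count c (L.flatMap (fun code => List.replicate (cs.getD code.toNat 0) (Char.ofNat code.toNat)))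
      = if (c.toNat : Int) ∈ L then cs.getD c.toNat 0 else 0 := by
  intro L
  induction L with
  | nil => simp
  | cons x L ih =>
    intro hb hnd
    rw [List.flatMap_cons, List.count_append, List.count_replicate,
      ih (fun y hy => hb y (List.mem_cons_of_mem _ hy)) hnd.of_cons]
    have hx := hb x List.mem_cons_self
    by_cases hxc : x = (c.toNat : Int)
    · have hxt : x.toNat = c.toNat := by omega
      have h1 : (Char.ofNat x.toNat) == c := by rw [hxt, Char.ofNat_toNat]; simp
      have h2 : (c.toNat : Int) ∉ L := by
        intro hmem
        exact (List.nodup_cons.mp hnd).1 (by rw [hxc]; exact hmem)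
      simp [h2, hxc]
    · have h1 : ¬ ((Char.ofNat x.toNat) == c) = true := by
        simp only [beq_iff_eq]
        intro he
        have := congrArg Char.toNat he
        rw [pv_toNat_ofNat _ (by omega)] at this
        exact hxc (by omega)
      simp only [h1, List.mem_cons]
      have : ¬ ((c.toNat : Int) = x) := fun hh => hxc hh.symm
      simp [this]

lemma pv_count_emit (g : List Char) (hg : ∀ c ∈ g, c.toNat ≤ 126) (c : Char)
    (hc : c.toNat ≤ 126) : List.count c (pvEmit g) = List.count c g := by
  rw [pvEmit, pv_flush_eq_flatMap,
    pv_count_flat _ c hc _ (pv_emit_range_bounds g hg)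
      (by rw [PySem.List.pyRange_neg_one_eq_reverse]
          exact List.nodup_reverse.mpr (PySem.List.nodup_pyRange_one _ _))]
  have hcount : (pvCounts g).getD c.toNat 0 = List.count c g := by
    rw [pv_counts_getD g hg c.toNat, List.count_eq_countP]
    apply List.countP_congr
    intro x hx
    simp only [beq_iff_eq]
    exact ⟨fun he => pv_toNat_inj he, fun he => by rw [he]⟩
  split_ifs with hmem
  · exact hcount
  · rw [eq_comm, List.count_eq_zero]
    intro hcg
    exact hmem (PySem.List.mem_pyRange_neg_one.mpr
      ⟨by have := pv_foldMin_le g 127 c hcg; simp only [pvMn] at *; omega,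
       by have := pv_foldMax_ge g (-1) c hcg; simp only [pvMx] at *; omega⟩)

lemma pv_pairwise_flat (cs : List Nat) :
    ∀ (L : List Int), (∀ x ∈ L, 0 ≤ x ∧ x ≤ 126) → L.Pairwise (fun a b => b < a) →
    (L.flatMap (fun code => List.replicate (cs.getD code.toNat 0) (Char.ofNat code.toNat))).Pairwise
      (fun a b => b.toNat ≤ a.toNat) := by
  intro L
  induction L with
  | nil => simp
  | cons x L ih =>
    intro hb hp
    rw [List.flatMap_cons, List.pairwise_append]
    refine ⟨List.pairwise_replicate.mpr (Or.inr le_rfl),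
      ih (fun y hy => hb y (List.mem_cons_of_mem _ hy)) hp.of_cons, ?_⟩
    intro a ha b hb'
    have hax := List.eq_of_mem_replicate ha
    obtain ⟨y, hy, hby⟩ := List.mem_flatMap.mp hb'
    have hbx := List.eq_of_mem_replicate hby
    subst hax hbx
    have hxb := hb x List.mem_cons_self
    have hyb := hb y (List.mem_cons_of_mem _ hy)
    have hlt : y < x := (List.pairwise_cons.mp hp).1 y hy
    rw [pv_toNat_ofNat _ (by omega), pv_toNat_ofNat _ (by omega)]
    omega

lemma pv_pairwise_emit (g : List Char) (hg : ∀ c ∈ g, c.toNat ≤ 126) :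
    (pvEmit g).Pairwise (fun a b => b.toNat ≤ a.toNat) := by
  rw [pvEmit, pv_flush_eq_flatMap]
  apply pv_pairwise_flat
  · exact pv_emit_range_bounds g hg
  · rw [PySem.List.pyRange_neg_one_eq_reverse, List.pairwise_reverse]
    exact PySem.List.pairwise_lt_pyRange_one _ _

-- the counting sort of a group equals A's sorted(group, reverse=True)
lemma pv_group_eq (g : List Char) (h : ∀ c ∈ g, c.toNat ≤ 126) :
    pvEmit g = PySem.List.sorted g (fun x => x) true := by
  apply PySem.List.eq_of_perm_of_pairwise_le_of_injective (fun c : Char => -(c.toNat : Int))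
    (fun a b hab => pv_toNat_inj (by have h0 := hab; simp only [neg_inj, Nat.cast_inj] at h0; exact h0))
  · refine (List.perm_iff_count.mpr ?_).trans (PySem.List.sorted_perm g _ true).symm
    intro c
    by_cases hc : c.toNat ≤ 126
    · exact pv_count_emit g h c hc
    · have h1 : c ∉ pvEmit g := fun hm => hc (pv_mem_emit g h c hm)
      have h2 : c ∉ g := fun hm => hc (h c hm)
      rw [List.count_eq_zero.mpr h1, List.count_eq_zero.mpr h2]
  · exact (pv_pairwise_emit _ h).imp (fun {a b} hab => neg_le_neg (by exact_mod_cast hab))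
  · refine (PySem.List.sorted_pairwise_rev g _).imp ?_
    intro a b hab
    have h2 : b.toNat ≤ a.toNat := UInt32.le_iff_toNat_le.mp (Char.le_def.mp hab)
    exact neg_le_neg (by exact_mod_cast h2)

-- the loop invariant of B's single pass
lemma pv_rowB_fold (r : List Char) : ∀ (pre : List Char) (out : List Char),
    ((r.foldl pvStepRow (pvCounts pre, pvMn pre, pvMx pre, out)).2.2.2
        ++ pvFlush (r.foldl pvStepRow (pvCounts pre, pvMn pre, pvMx pre, out)).1
             (r.foldl pvStepRow (pvCounts pre, pvMn pre, pvMx pre, out)).2.1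
             (r.foldl pvStepRow (pvCounts pre, pvMn pre, pvMx pre, out)).2.2.1)
      = out ++ PySem.Chars.join ['#'] ((pvSplit pre r).map pvEmit) := by
  induction r with
  | nil => intro pre out; simp [pvSplit, pvEmit, PySem.Chars.join, List.intercalate]
  | cons c r ih =>
    intro pre out
    by_cases hc : c = '#'
    · subst hc
      rw [List.foldl_cons]
      have hstep : pvStepRow (pvCounts pre, pvMn pre, pvMx pre, out) '#'
          = (pvCounts [], pvMn [], pvMx [], out ++ pvEmit pre ++ ['#']) := by
        simp [pvStepRow, pvCounts, pvMn, pvMx, pvEmit]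
      rw [hstep, ih [] (out ++ pvEmit pre ++ ['#'])]
      have hne : (pvSplit [] r).map pvEmit ≠ [] := by
        simp [pvSplit_ne_nil]
      rw [show pvSplit pre ('#' :: r) = pre :: pvSplit [] r by simp [pvSplit]]
      rw [List.map_cons, pv_join_cons _ _ hne]
      simp
    · rw [List.foldl_cons]
      have hstep : pvStepRow (pvCounts pre, pvMn pre, pvMx pre, out) c
          = (pvCounts (pre ++ [c]), pvMn (pre ++ [c]), pvMx (pre ++ [c]), out) := by
        simp [pvStepRow, hc, pvCounts, pvMn, pvMx, List.foldl_append, pvBump]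
      rw [hstep, ih (pre ++ [c]) out]
      rw [show pvSplit pre (c :: r) = pvSplit (pre ++ [c]) r by simp [pvSplit, hc]]

lemma pv_rowB_char (r : List Char) :
    pvRowB r = PySem.Chars.join ['#'] ((pvSplit [] r).map pvEmit) := by
  have h := pv_rowB_fold r [] []
  rw [show pvCounts [] = List.replicate 128 0 from rfl,
    show pvMn [] = 127 from rfl, show pvMx [] = (-1) from rfl] at h
  simpa [pvRowB] using h

lemma pv_rowA_char (r : List Char) :
    pvRowA r = PySem.Chars.join ['#'] ((pvSplit [] r).map (fun g => PySem.List.sorted g (fun x => x) true)) := by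
  simp [pvRowA, pv_splitOn_eq]

lemma pv_mem_pvSplit (r : List Char) : ∀ (pre g : List Char) (c : Char),
    g ∈ pvSplit pre r → c ∈ g → c ∈ pre ∨ c ∈ r := by
  induction r with
  | nil => intro pre g c hg hc; simp [pvSplit] at hg; subst hg; exact Or.inl hc
  | cons x r ih =>
    intro pre g c hg hc
    by_cases hx : x = '#'
    · subst hx
      simp only [pvSplit, if_true] at hg
      rcases List.mem_cons.mp hg with h | h
      · subst h; exact Or.inl hc
      · rcases ih [] g c h hc with h' | h'
        · simp at h'
        · exact Or.inr (List.mem_cons_of_mem _ h')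
    · simp only [pvSplit, hx, if_false] at hg
      rcases ih (pre ++ [x]) g c hg hc with h' | h'
      · rcases List.mem_append.mp h' with h'' | h''
        · exact Or.inl h''
        · simp at h''; subst h''; exact Or.inr List.mem_cons_self
      · exact Or.inr (List.mem_cons_of_mem _ h')

-- the two inner loops agree on rows whose characters have code ≤ 126
lemma pv_row_eq (r : List Char) (h : ∀ c ∈ r, c.toNat ≤ 126) : pvRowA r = pvRowB r := by
  rw [pv_rowA_char, pv_rowB_char]
  have hmap : (pvSplit [] r).map (fun g => PySem.List.sorted g (fun x => x) true)
      = (pvSplit [] r).map pvEmit := by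
    apply List.map_congr_left
    intro g hg
    refine (pv_group_eq g ?_).symm
    intro c hc
    rcases pv_mem_pvSplit r [] g c hg hc with h' | h'
    · simp at h'
    · exact h c h'
  rw [hmap]

lemma pv_mem_intersperse (sep : List Char) (l : List (List Char)) (a : List Char)
    (h : a ∈ l.intersperse sep) : a = sep ∨ a ∈ l := by
  induction l with
  | nil => simp at h
  | cons x t ih =>
    cases t with
    | nil => simp at h; exact Or.inr (by simp [h])
    | cons y t2 =>
      rw [List.intersperse_cons₂] at h
      rcases List.mem_cons.mp h with h1 | h1
      · exact Or.inr (by simp [h1])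
      · rcases List.mem_cons.mp h1 with h2 | h2
        · exact Or.inl h2
        · rcases ih h2 with h3 | h3
          · exact Or.inl h3
          · exact Or.inr (List.mem_cons_of_mem _ h3)

lemma pv_mem_rowB (r : List Char) (hr : ∀ c ∈ r, c.toNat ≤ 126) (c : Char)
    (h : c ∈ pvRowB r) : c.toNat ≤ 126 := by
  rw [pv_rowB_char] at h
  simp only [PySem.Chars.join, List.intercalate] at h
  obtain ⟨part, hpart, hc⟩ := List.mem_flatten.mp h
  rcases pv_mem_intersperse _ _ _ hpart with h' | h'
  · subst h'
    have : c = '#' := by simpa using hc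
    subst this; decide
  · obtain ⟨g, hg, he⟩ := List.mem_map.mp h'
    refine pv_mem_emit g ?_ c (he ▸ hc)
    intro c' hc'
    rcases pv_mem_pvSplit r [] g c' hg hc' with h2 | h2
    · simp at h2
    · exact hr c' h2

lemma pv_ok_transpose (g : List (List Char)) (h : pvOk g) : pvOk (pvTranspose g) := by
  induction g using pvTranspose.induct with
  | case1 => rw [pvTranspose]; intro r hr; simp at hr
  | case2 r rs hany => rw [pvTranspose]; simp only [dif_pos hany]; intro r' hr'; simp at hr'
  | case3 r rs hany ih =>
    rw [pvTranspose]
    simp only [dif_neg hany]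
    intro r' hr' c hc
    rcases List.mem_cons.mp hr' with h1 | h1
    · subst h1
      obtain ⟨l, hl, he⟩ := List.mem_map.mp hc
      have hlne : l ≠ [] := by
        intro hnil
        exact hany (List.any_eq_true.mpr ⟨l, hl, by simp [hnil]⟩)
      have : c ∈ l := by
        rw [← he, List.headD_eq_head?_getD]
        cases hl2 : l.head? with
        | none => exact absurd (List.head?_eq_none_iff.mp hl2) hlne
        | some x => simpa using List.mem_of_mem_head? (by rw [hl2]; rfl)
      exact h l hl c this
    · refine ih ?_ r' h1 c hc
      intro l hl c' hc'
      obtain ⟨l0, hl0, he0⟩ := List.mem_map.mp hl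
      exact h l0 hl0 c' (by rw [← he0] at hc'; exact List.mem_of_mem_tail hc')

lemma pv_ok_stepB (g : List (List Char)) (h : pvOk g) : pvOk (pvStepB g) := by
  intro r hr c hc
  obtain ⟨row, hrow, he⟩ := List.mem_map.mp hr
  exact pv_mem_rowB row (pv_ok_transpose g h row hrow) c
    (by rw [← he] at hc; exact List.mem_reverse.mp hc)

lemma pv_step_eq (g : List (List Char)) (h : pvOk g) : pvStepA g = pvStepB g := by
  simp only [pvStepA, pvStepB, List.map_map]
  apply List.map_congr_left
  intro r hr
  simp only [Function.comp]
  rw [pv_row_eq r (pv_ok_transpose g h r hr)]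

-- ===== VERDICT (by name: the statement is the Claim_ definition above) =====
theorem tilt_cyclic_spec : Claim_equal_tilt_cyclic := by
  intro grid hd
  unfold Spec_tilt_cyclic tilt_cyclic tilt_cyclic_alt
  have h4 : PySem.List.pyRange 0 4 1 = [0, 1, 2, 3] := by decide
  rw [h4]
  simp only [List.foldl_cons, List.foldl_nil]
  have hok0 : pvOk (grid.map String.toList) := by
    intro r hr c hc
    obtain ⟨s, hs, he⟩ := List.mem_map.mp hr
    have := (List.all_eq_true.mp hd) s hs
    have := (List.all_eq_true.mp (by simpa [pvDomStr] using this)) c (by rw [he]; exact hc)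
    simp [pvDomChar] at this
    omega
  have hok1 := pv_ok_stepB _ hok0
  have hok2 := pv_ok_stepB _ hok1
  have hok3 := pv_ok_stepB _ hok2
  rw [pv_step_eq _ hok0, pv_step_eq _ hok1, pv_step_eq _ hok2, pv_step_eq _ hok3]
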